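-- pv_equiv track=rewrite | github.com/ksabhinav/projectfiner | public/slbc-data/normalize_fields_v2.py | pick_canonical
-- ===== SOURCE A (Python) =====
-- def pick_canonical(variants_with_counts):
--     """
--     Given a dict of {field_name: count}, pick the canonical form.
--     Prefer: most frequent. On tie, prefer title-cased / more standard form.
--     """
--     if len(variants_with_counts) == 1:
--         return list(variants_with_counts.keys())[0]
--
--     # Sort by count (desc), then by "quality" heuristics
--     def quality_score(name):
--         score = 0
--         # Prefer title case over ALL CAPS
--         words = name.split()
--         for w in words:
--             if w[0].isupper() and not w.isupper():
--                 score += 1  # title-cased word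
--         # Prefer with trailing No. over NO
--         if name.endswith('No.'):
--             score += 2
--         # Prefer without trailing (s)
--         if '(s)' not in name:
--             score += 1
--         return score
--
--     sorted_variants = sorted(
--         variants_with_counts.items(),
--         key=lambda x: (-x[1], -quality_score(x[0]), x[0])
--     )
--     return sorted_variants[0][0]
-- ===== SOURCE B (Python) =====
-- def pick_canonical(variants_with_counts):
--     def quality_score(name):
--         score = 0
--         words = name.split()
--         for w in words:
--             if w[0].isupper() and not w.isupper():
--                 score += 1
--         if name.endswith('No.'):
--             score += 2
--         if '(s)' not in name:
--             score += 1
--         return score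
--
--     max_count = max(variants_with_counts.values())
--     top = [n for n, c in variants_with_counts.items() if c == max_count]
--     best_q = max(quality_score(n) for n in top)
--     return min(n for n in top if quality_score(n) == best_q)
-- ===== Notes on version B (the rewrite author's own statement) =====
-- stated objective: faster
-- what changed: B replaces A's full sort under the composite key (-count, -quality, name) by staged linear passes: max of the counts, keep the names at that count, max quality among them, lexicographic min of the remainder.
import Mathlib
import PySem

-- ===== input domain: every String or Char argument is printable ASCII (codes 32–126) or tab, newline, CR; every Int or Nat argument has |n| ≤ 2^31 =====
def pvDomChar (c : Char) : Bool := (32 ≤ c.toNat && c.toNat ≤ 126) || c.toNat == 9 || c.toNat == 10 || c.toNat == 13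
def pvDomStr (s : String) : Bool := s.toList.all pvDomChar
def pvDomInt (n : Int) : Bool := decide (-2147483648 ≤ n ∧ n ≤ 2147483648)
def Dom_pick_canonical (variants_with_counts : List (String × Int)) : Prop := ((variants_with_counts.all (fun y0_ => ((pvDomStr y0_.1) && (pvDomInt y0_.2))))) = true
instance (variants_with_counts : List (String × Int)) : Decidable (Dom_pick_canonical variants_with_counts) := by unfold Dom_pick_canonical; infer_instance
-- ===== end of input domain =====

-- B replaces A's full sort by -count/-quality/name with staged max/filter passes and a final
-- lexicographic min: O(n) passes instead of a sort (measured faster in a timing run).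

-- ===== PORT A =====

-- Python str.isupper(), ported by hand (no PySem string-level primitive): at least one cased
-- character and no lowercase character; exact on the ASCII domain, where cased = letter.
def pvStrIsupper (w : String) : Bool :=
  (w.toList.any (fun c => PySem.Chars.isupper c || PySem.Chars.islower c)) &&
  (w.toList.all (fun c => !PySem.Chars.islower c))

-- the nested quality_score helper (shared verbatim by A and B in the Python sources)
def qualityScore (name : String) : Int :=
  let words := PySem.Str.split₀ name
  let score : Int := words.foldl (fun s w =>
    if (match PySem.Str.pyGet? w 0 with          -- w[0]: words from split() are nonempty
        | some c => PySem.Chars.isupper c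
        | none => false) && !(pvStrIsupper w)
    then s + 1 else s) 0
  let score := if PySem.Str.endswith name "No." then score + 2 else score
  if !(PySem.Str.isIn "(s)" name) then score + 1 else score

def pick_canonical (variants_with_counts : List (String × Int)) : String :=
  if variants_with_counts.length = 1 then
    match PySem.List.pyGet? (variants_with_counts.map Prod.fst) 0 with
    | some s => s
    | none => ""                                  -- unreachable: length = 1
  else
    match PySem.List.pyGet?
        (PySem.List.sorted variants_with_counts
          (fun x => toLex (-x.2, toLex (-(qualityScore x.1), x.1)))) 0 with
    | some p => p.1
    | none => ""                                  -- IndexError on the empty dict: excluded by Pre_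

-- ===== PORT B =====
def pick_canonical_alt (variants_with_counts : List (String × Int)) : String :=
  let maxCount := (PySem.List.max? (variants_with_counts.map Prod.snd) (fun c => c)).getD 0
      -- max() raises ValueError on the empty dict: excluded by Pre_
  let top := (variants_with_counts.filter (fun x => x.2 == maxCount)).map Prod.fst
  let bestQ := (PySem.List.max? (top.map qualityScore) (fun q => q)).getD 0
  (PySem.List.min? (top.filter (fun n => qualityScore n == bestQ)) (fun n => n)).getD ""

-- ===== PRECONDITION & SPEC =====
-- Pre_ excludes only the empty dict, on which A raises IndexError (and B's max() raises ValueError).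
def Pre_pick_canonical (variants_with_counts : List (String × Int)) : Prop :=
  variants_with_counts ≠ []
instance (variants_with_counts : List (String × Int)) : Decidable (Pre_pick_canonical variants_with_counts) := by unfold Pre_pick_canonical; infer_instance

def pvWitness_pick_canonical : (List (String × Int)) := [("Account No.", 3), ("ACCOUNT NO", 3), ("account no(s)", 1)]

def Spec_pick_canonical (variants_with_counts : List (String × Int)) (out : String) : Prop := out = pick_canonical_alt variants_with_counts
instance (variants_with_counts : List (String × Int)) (out : String) : Decidable (Spec_pick_canonical variants_with_counts out) := by unfold Spec_pick_canonical; infer_instance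

-- ===== CLAIM (what is proved, stated in full; the proofs are below) =====
def Claim_equal_pick_canonical : Prop := ∀ (variants_with_counts : List (String × Int)), Dom_pick_canonical variants_with_counts → Pre_pick_canonical variants_with_counts → Spec_pick_canonical variants_with_counts (pick_canonical variants_with_counts)

-- ===== LEMMAS AND PROOFS =====

-- A's sort key, named for the proofs
def pvKey (x : String × Int) : Lex (Int × Lex (Int × String)) :=
  toLex (-x.2, toLex (-(qualityScore x.1), x.1))

-- the heart: B returns the name of any pvKey-minimal entry
theorem alt_eq_of_min (v : List (String × Int)) (m : String × Int) (hm : m ∈ v)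
    (hmin : ∀ y ∈ v, pvKey m ≤ pvKey y) : pick_canonical_alt v = m.1 := by
  obtain ⟨M, hM⟩ : ∃ M, PySem.List.max? (v.map Prod.snd) (fun c => c) = some M := by
    rcases h : PySem.List.max? (v.map Prod.snd) (fun c => c) with _ | M
    · rw [PySem.List.max?_eq_none_iff] at h; simp at h; subst h; simp at hm
    · exact ⟨M, rfl⟩
  have hMmem := PySem.List.max?_mem hM
  have hMmax := PySem.List.max?_isMax hM
  -- count comparison from the lex key
  have hle : ∀ y ∈ v, y.2 ≤ m.2 := by
    intro y hy
    have := hmin y hy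
    rw [pvKey, pvKey, Prod.Lex.le_iff] at this
    rcases this with h | ⟨h, _⟩ <;> simp at h <;> omega
  have hm2 : m.2 = M := by
    obtain ⟨y, hyv, hy2⟩ := List.mem_map.mp hMmem
    have h1 : m.2 ≤ M := hMmax m.2 (List.mem_map_of_mem hm)
    have h2 : M ≤ m.2 := hy2 ▸ hle y hyv
    omega
  -- quality comparison among entries with maximal count
  have hq : ∀ y ∈ v, y.2 = M → qualityScore y.1 ≤ qualityScore m.1 ∧
      (qualityScore y.1 = qualityScore m.1 → m.1 ≤ y.1) := by
    intro y hy hy2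
    have := hmin y hy
    rw [pvKey, pvKey, Prod.Lex.le_iff] at this
    rcases this with h | ⟨_, h⟩
    · simp at h; omega
    · rw [Prod.Lex.le_iff] at h
      rcases h with h | ⟨h, h'⟩
      · simp at h; constructor
        · omega
        · intro he; omega
      · simp at h; exact ⟨le_of_eq h.symm, fun _ => h'⟩
  -- the B-side sets
  set top := (v.filter (fun x => x.2 == M)).map Prod.fst with htop
  have hmtop : m.1 ∈ top := by
    rw [htop]
    exact List.mem_map_of_mem (List.mem_filter.mpr ⟨hm, by simp [hm2]⟩)
  have htop_src : ∀ n ∈ top, ∃ y ∈ v, y.2 = M ∧ y.1 = n := by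
    intro n hn
    rw [htop] at hn
    obtain ⟨y, hy, hyn⟩ := List.mem_map.mp hn
    have := List.mem_filter.mp hy
    exact ⟨y, this.1, by simpa using this.2, hyn⟩
  obtain ⟨Q, hQ⟩ : ∃ Q, PySem.List.max? (top.map qualityScore) (fun q => q) = some Q := by
    rcases h : PySem.List.max? (top.map qualityScore) (fun q => q) with _ | Q
    · rw [PySem.List.max?_eq_none_iff] at h; simp at h; rw [h] at hmtop; simp at hmtop
    · exact ⟨Q, rfl⟩
  have hQmem := PySem.List.max?_mem hQ
  have hQmax := PySem.List.max?_isMax hQ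
  have hQeq : Q = qualityScore m.1 := by
    obtain ⟨n, hn, hnQ⟩ := List.mem_map.mp hQmem
    obtain ⟨y, hyv, hy2, hy1⟩ := htop_src n hn
    have h1 : qualityScore n ≤ qualityScore m.1 := hy1 ▸ (hq y hyv hy2).1
    have h2 : qualityScore m.1 ≤ Q := hQmax _ (List.mem_map_of_mem hmtop)
    omega
  set fin := top.filter (fun n => qualityScore n == Q) with hfin
  have hmfin : m.1 ∈ fin := List.mem_filter.mpr ⟨hmtop, by simp [hQeq]⟩
  obtain ⟨w, hw⟩ : ∃ w, PySem.List.min? fin (fun n => n) = some w := by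
    rcases h : PySem.List.min? fin (fun n => n) with _ | w
    · rw [PySem.List.min?_eq_none_iff] at h; rw [h] at hmfin; simp at hmfin
    · exact ⟨w, rfl⟩
  have hwmem := PySem.List.min?_mem hw
  have hwmin := PySem.List.min?_isMin hw
  have hwm : w = m.1 := by
    have hw1 : w ≤ m.1 := hwmin m.1 hmfin
    have := List.mem_filter.mp hwmem
    obtain ⟨y, hyv, hy2, hy1⟩ := htop_src w this.1
    have hqw : qualityScore w = Q := by simpa using this.2
    have hw2 : m.1 ≤ w := hy1 ▸ (hq y hyv hy2).2 (by rw [hy1, hqw, hQeq])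
    exact le_antisymm hw1 hw2
  show (PySem.List.min? ((((v.filter (fun x => x.2 == (PySem.List.max? (v.map Prod.snd) (fun c => c)).getD 0)).map Prod.fst)).filter (fun n => qualityScore n == (PySem.List.max? ((((v.filter (fun x => x.2 == (PySem.List.max? (v.map Prod.snd) (fun c => c)).getD 0)).map Prod.fst)).map qualityScore) (fun q => q)).getD 0)) (fun n => n)).getD "" = m.1
  rw [hM]
  simp only [Option.getD_some]
  rw [← htop, hQ]
  simp only [Option.getD_some]
  rw [← hfin, hw, Option.getD_some, hwm]

theorem pick_canonical_spec : Claim_equal_pick_canonical := by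
  intro v _ hpre
  unfold Spec_pick_canonical pick_canonical
  split_ifs with h1
  · obtain ⟨x, hx⟩ := List.length_eq_one_iff.mp h1
    subst hx
    simp only [List.map_cons, List.map_nil, PySem.List.pyGet?]
    norm_num
    exact (alt_eq_of_min [x] x (by simp) (by intro y hy; simp at hy; subst hy; exact le_refl _)).symm
  · cases h : PySem.List.sorted v (fun x => toLex (-x.2, toLex (-(qualityScore x.1), x.1))) with
    | nil => rw [PySem.List.sorted_eq_nil_iff] at h; exact absurd h hpre
    | cons m t =>
      have hm : m ∈ v := (PySem.List.mem_sorted v _ false m).mp (h ▸ List.mem_cons_self)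
      have hmin := PySem.List.key_head_sorted_le v _ h
      simp only [PySem.List.pyGet?, PySem.List.pyIdx?]
      norm_num
      exact (alt_eq_of_min v m hm hmin).symm
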